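-- pv_equiv track=rewrite | github.com/awnion/contests | codeforces/gym/gym_102906/f_dfs.py | make_next_positions
-- ===== SOURCE A (Python) =====
-- def make_next_positions(a, n, k):
--     positions = [n + 1] * ((n + 3)*k)
--     for el in range(k):
--         cur = n + 1
--         for i in range(n - 1, -1, -1):
--             if a[i] == el + 1:
--                 cur = i + 1
--             positions[i*k + el] = cur
--     return positions
-- ===== SOURCE B (Python) =====
-- def make_next_positions(a, n, k):
--     # Single backward pass maintaining the whole next-occurrence vector per row
--     # (A rescans the array once per value, column by column).
--     if k <= 0 or n <= 0:
--         return [n + 1] * ((n + 3) * k)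
--     nxt = [n + 1] * k
--     rows = []
--     for i in range(n - 1, -1, -1):
--         v = a[i]
--         if 1 <= v <= k:
--             nxt[v - 1] = i + 1
--         rows.append(nxt[:])
--     rows.reverse()
--     out = [x for row in rows for x in row]
--     out += [n + 1] * (3 * k)
--     return out
-- ===== Notes on version B (the rewrite author's own statement) =====
-- stated objective: alternative
-- what changed: Replaces A's per-value column scans (k backward passes, each writing one column of the flat table) by one backward pass that maintains the full next-occurrence vector and emits whole rows, flattened with the constant tail appended.
import Mathlib
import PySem

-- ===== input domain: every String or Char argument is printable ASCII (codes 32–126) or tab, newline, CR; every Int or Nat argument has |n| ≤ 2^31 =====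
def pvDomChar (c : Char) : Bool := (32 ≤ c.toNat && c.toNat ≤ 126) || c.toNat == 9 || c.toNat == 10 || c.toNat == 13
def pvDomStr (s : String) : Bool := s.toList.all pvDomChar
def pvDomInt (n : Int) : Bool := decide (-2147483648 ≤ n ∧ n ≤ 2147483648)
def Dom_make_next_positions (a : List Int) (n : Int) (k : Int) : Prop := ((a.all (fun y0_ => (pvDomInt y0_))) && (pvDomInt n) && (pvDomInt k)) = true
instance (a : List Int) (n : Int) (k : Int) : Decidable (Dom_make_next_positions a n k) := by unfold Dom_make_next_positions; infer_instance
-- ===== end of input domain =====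

-- B replaces A's per-value backward column scans by one backward pass that keeps the whole
-- next-occurrence vector and emits it row by row (alternative decomposition, same cost).

-- ===== PORT A =====
-- body of A's inner loop (for i in range(n-1,-1,-1): ... one column write)
def colStep (a : List Int) (k el : Int) (st : List Int × Int) (i : Int) : List Int × Int :=
  let cur := if PySem.List.pyGetD a i 0 = el + 1 then i + 1 else st.2
  (PySem.List.pySetD st.1 (i * k + el) cur, cur)

-- one iteration of A's outer loop: fill column el by scanning i = n-1 .. 0
def stepA (a : List Int) (n k : Int) (positions : List Int) (el : Int) : List Int :=
  ((PySem.List.pyRange (n - 1) (-1) (-1)).foldl (colStep a k el) (positions, n + 1)).1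

def make_next_positions (a : List Int) (n : Int) (k : Int) : List Int :=
  (PySem.List.pyRange 0 k 1).foldl (stepA a n k)
    (List.replicate ((n + 3) * k).toNat (n + 1))

-- ===== PORT B =====
-- body of B's single backward loop: update the next-occurrence vector, record the row
def rowStepB (a : List Int) (k : Int) (st : List Int × List (List Int)) (i : Int) :
    List Int × List (List Int) :=
  let v := PySem.List.pyGetD a i 0
  let nxt := if 1 ≤ v ∧ v ≤ k then PySem.List.pySetD st.1 (v - 1) (i + 1) else st.1
  (nxt, st.2 ++ [nxt])

def make_next_positions_alt (a : List Int) (n : Int) (k : Int) : List Int :=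
  if k ≤ 0 ∨ n ≤ 0 then List.replicate ((n + 3) * k).toNat (n + 1)
  else
    ((PySem.List.pyRange (n - 1) (-1) (-1)).foldl (rowStepB a k)
        (List.replicate k.toNat (n + 1), [])).2.reverse.flatten
    ++ List.replicate (3 * k).toNat (n + 1)

-- ===== PRECONDITION & SPEC =====
-- Pre_ excludes exactly the inputs where Python A raises IndexError (k ≥ 1 and n > len(a)).
def Pre_make_next_positions (a : List Int) (n : Int) (k : Int) : Prop := k ≤ 0 ∨ n ≤ a.length
instance (a : List Int) (n : Int) (k : Int) : Decidable (Pre_make_next_positions a n k) := by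
  unfold Pre_make_next_positions; infer_instance

def pvWitness_make_next_positions : List Int × Int × Int := ([1, 2, 1], 3, 2)

def Spec_make_next_positions (a : List Int) (n : Int) (k : Int) (out : List Int) : Prop := out = make_next_positions_alt a n k
instance (a : List Int) (n : Int) (k : Int) (out : List Int) : Decidable (Spec_make_next_positions a n k out) := by unfold Spec_make_next_positions; infer_instance

-- ===== CLAIM (what is proved, stated in full; the proofs are below) =====
def Claim_equal_make_next_positions : Prop := ∀ (a : List Int) (n : Int) (k : Int), Dom_make_next_positions a n k → Pre_make_next_positions a n k → Spec_make_next_positions a n k (make_next_positions a n k)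

-- ===== LEMMAS AND PROOFS =====

-- next-occurrence value: smallest j with i ≤ j < n and a[j] = v, as 1-based position; n+1 if none
def nxtF (a : List Int) (n : Int) (v : Int) (i : Nat) : Int :=
  if h : i < n.toNat then (if a.getD i 0 = v then (i : Int) + 1 else nxtF a n v (i + 1)) else n + 1
termination_by n.toNat - i

-- row i of the table: next occurrence of each value 1..k from position i on
def nxtRow (a : List Int) (n k : Int) (i : Nat) : List Int :=
  (List.range k.toNat).map (fun (e : Nat) => nxtF a n ((e : Int) + 1) i)

theorem nxtF_lt (a : List Int) (n v : Int) {i : Nat} (h : i < n.toNat) :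
    nxtF a n v i = if a.getD i 0 = v then (i : Int) + 1 else nxtF a n v (i + 1) := by
  conv_lhs => rw [nxtF]
  rw [dif_pos h]

theorem nxtF_top (a : List Int) (n v : Int) : nxtF a n v n.toNat = n + 1 := by
  rw [nxtF]; simp

theorem ext_getD (xs ys : List Int) (hlen : xs.length = ys.length)
    (h : ∀ m : Nat, xs.getD m 0 = ys.getD m 0) : xs = ys := by
  apply List.ext_getElem hlen
  intro i h1 h2
  have := h i
  simpa [List.getD_eq_getElem?_getD, List.getElem?_eq_getElem, h1, h2] using this

theorem decompKE (K E j m : Nat) (hE : E < K) : m = j * K + E ↔ (m % K = E ∧ m / K = j) := by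
  constructor
  · rintro rfl
    refine ⟨?_, ?_⟩
    · rw [Nat.mul_comm, Nat.mul_add_mod, Nat.mod_eq_of_lt hE]
    · rw [Nat.mul_comm, Nat.mul_add_div (by omega), Nat.div_eq_of_lt hE]
      omega
  · rintro ⟨h1, h2⟩
    calc m = K * (m / K) + m % K := (Nat.div_add_mod m K).symm
      _ = j * K + E := by rw [h1, h2, Nat.mul_comm]

theorem foldl_fixed {α β : Type} (f : α → β → α) (hf : ∀ x y, f x y = x) (l : List β) (p : α) :
    l.foldl f p = p := by
  induction l generalizing p with
  | nil => rfl
  | cons x xs ih => rw [List.foldl_cons, hf]; exact ih p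

theorem length_nxtRow (a : List Int) (n k : Int) (i : Nat) : (nxtRow a n k i).length = k.toNat := by
  simp [nxtRow]

theorem nxtRow_getD (a : List Int) (n k : Int) (i : Nat) (e : Nat) :
    (nxtRow a n k i).getD e 0 = if e < k.toNat then nxtF a n ((e : Int) + 1) i else 0 := by
  rw [List.getD_eq_getElem?_getD]
  by_cases h : e < k.toNat
  · rw [if_pos h]
    simp [nxtRow, List.getElem?_map, List.getElem?_range h]
  · rw [if_neg h]
    rw [List.getElem?_eq_none (by rw [length_nxtRow]; omega)]
    rfl

theorem nxtRow_top (a : List Int) (n k : Int) :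
    nxtRow a n k n.toNat = List.replicate k.toNat (n + 1) := by
  apply ext_getD
  · rw [length_nxtRow, List.length_replicate]
  · intro m
    rw [nxtRow_getD]
    by_cases h : m < k.toNat
    · rw [if_pos h, nxtF_top, List.getD_eq_getElem _ _ (by simpa using h), List.getElem_replicate]
    · rw [if_neg h, List.getD_eq_default _ _ (by simpa using h)]

theorem rowStep (a : List Int) (n k : Int) (i : Nat) (hi : i < n.toNat) :
    (if 1 ≤ a.getD i 0 ∧ a.getD i 0 ≤ k then
        PySem.List.pySetD (nxtRow a n k (i + 1)) (a.getD i 0 - 1) ((i : Int) + 1)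
      else nxtRow a n k (i + 1)) = nxtRow a n k i := by
  by_cases hv : 1 ≤ a.getD i 0 ∧ a.getD i 0 ≤ k
  · obtain ⟨hv1, hv2⟩ := hv
    rw [if_pos ⟨hv1, hv2⟩, PySem.List.pySetD_of_nonneg _ _ (by omega)]
    have hidxlt : (a.getD i 0 - 1).toNat < (nxtRow a n k (i + 1)).length := by
      rw [length_nxtRow]; omega
    apply ext_getD
    · rw [List.length_set, length_nxtRow, length_nxtRow]
    · intro m
      rw [List.getD_eq_getElem?_getD, List.getElem?_set_of_lt' _ _ hidxlt]
      by_cases hm : (a.getD i 0 - 1).toNat = m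
      · rw [if_pos hm, Option.getD_some, nxtRow_getD, if_pos (by omega),
           nxtF_lt a n _ hi, if_pos (by omega)]
      · rw [if_neg hm, ← List.getD_eq_getElem?_getD, nxtRow_getD, nxtRow_getD]
        by_cases hmk : m < k.toNat
        · rw [if_pos hmk, if_pos hmk, nxtF_lt a n _ hi, if_neg (by omega)]
        · rw [if_neg hmk, if_neg hmk]
  · rw [if_neg hv]
    apply ext_getD
    · rw [length_nxtRow, length_nxtRow]
    · intro m
      rw [nxtRow_getD, nxtRow_getD]
      by_cases hmk : m < k.toNat
      · rw [if_pos hmk, if_pos hmk, nxtF_lt a n _ hi,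
           if_neg (fun heq => hv ⟨by omega, by omega⟩)]
      · rw [if_neg hmk, if_neg hmk]

theorem altFold (a : List Int) (n k : Int) (i : Nat) (hi : i ≤ n.toNat) (rows : List (List Int)) :
    (PySem.List.pyRange ((i : Int) - 1) (-1) (-1)).foldl (rowStepB a k) (nxtRow a n k i, rows)
    = (nxtRow a n k 0, rows ++ ((List.range i).reverse.map (nxtRow a n k))) := by
  induction i generalizing rows with
  | zero =>
    rw [show ((0 : Nat) : Int) - 1 = -1 by norm_num, PySem.List.pyRange_neg_one_eq_nil (le_refl _)]
    simp
  | succ j ih =>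
    have hj : j < n.toNat := by omega
    rw [show ((j + 1 : Nat) : Int) - 1 = (j : Int) by push_cast; ring,
       PySem.List.pyRange_neg_one_cons (by omega : (-1 : Int) < (j : Int))]
    rw [List.foldl_cons]
    have hstep : rowStepB a k (nxtRow a n k (j + 1), rows) (j : Int)
        = (nxtRow a n k j, rows ++ [nxtRow a n k j]) := by
      simp only [rowStepB, PySem.List.pyGetD_natCast]
      rw [show ((j : Int) + 1) = ((j : Nat) : Int) + 1 from rfl, rowStep a n k j hj]
    rw [hstep, ih (by omega) (rows ++ [nxtRow a n k j])]
    rw [List.range_succ]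
    simp

theorem innerA (a : List Int) (n k el : Int) (hel0 : 0 ≤ el) (helk : el < k)
    (i : Nat) (hiN : i ≤ n.toNat) (p : List Int) (hp : n.toNat * k.toNat ≤ p.length) :
    ((PySem.List.pyRange ((i : Int) - 1) (-1) (-1)).foldl (colStep a k el)
        (p, nxtF a n (el + 1) i)).1.length = p.length ∧
    ∀ m : Nat,
      ((PySem.List.pyRange ((i : Int) - 1) (-1) (-1)).foldl (colStep a k el)
        (p, nxtF a n (el + 1) i)).1.getD m 0 =
      if m % k.toNat = el.toNat ∧ m / k.toNat < i then nxtF a n (el + 1) (m / k.toNat)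
      else p.getD m 0 := by
  induction i generalizing p with
  | zero =>
    rw [show ((0 : Nat) : Int) - 1 = -1 by norm_num, PySem.List.pyRange_neg_one_eq_nil (le_refl _)]
    simp
  | succ j ih =>
    have hj : j < n.toNat := by omega
    have hK : 0 < k.toNat := by omega
    have hE : el.toNat < k.toNat := by omega
    rw [show ((j + 1 : Nat) : Int) - 1 = (j : Int) by push_cast; ring,
       PySem.List.pyRange_neg_one_cons (by omega : (-1 : Int) < (j : Int))]
    rw [List.foldl_cons]
    have hidx : (j : Int) * k + el = ((j * k.toNat + el.toNat : Nat) : Int) := by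
      have h1 : ((k.toNat : Int)) = k := Int.toNat_of_nonneg (by omega)
      have h2 : ((el.toNat : Int)) = el := Int.toNat_of_nonneg hel0
      push_cast [h1, h2]; ring
    have hstep : colStep a k el (p, nxtF a n (el + 1) j.succ) (j : Int)
        = (p.set (j * k.toNat + el.toNat) (nxtF a n (el + 1) j), nxtF a n (el + 1) j) := by
      simp only [colStep, PySem.List.pyGetD_natCast]
      rw [hidx, PySem.List.pySetD_natCast]
      rw [show (if a.getD j 0 = el + 1 then (j : Int) + 1 else nxtF a n (el + 1) j.succ)
            = nxtF a n (el + 1) j from (nxtF_lt a n (el + 1) hj).symm]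
    rw [hstep]
    obtain ⟨ihl, ihg⟩ := ih (by omega) (p.set (j * k.toNat + el.toNat) (nxtF a n (el + 1) j))
      (by rw [List.length_set]; exact hp)
    refine ⟨by rw [ihl, List.length_set], ?_⟩
    intro m
    rw [ihg m]
    have hwr : j * k.toNat + el.toNat < p.length := by
      calc j * k.toNat + el.toNat < (j + 1) * k.toNat := by
            have h : (j + 1) * k.toNat = j * k.toNat + k.toNat := by ring
            omega
        _ ≤ n.toNat * k.toNat := Nat.mul_le_mul_right _ (by omega)
        _ ≤ p.length := hp
    have hset : (p.set (j * k.toNat + el.toNat) (nxtF a n (el + 1) j)).getD m 0 =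
        if m = j * k.toNat + el.toNat then nxtF a n (el + 1) j else p.getD m 0 := by
      rw [List.getD_eq_getElem?_getD, List.getElem?_set_of_lt' _ _ hwr]
      by_cases hm : m = j * k.toNat + el.toNat
      · rw [if_pos hm, if_pos hm.symm]; rfl
      · rw [if_neg hm, if_neg (fun h => hm h.symm), ← List.getD_eq_getElem?_getD]
    rw [hset]
    by_cases hc : m % k.toNat = el.toNat ∧ m / k.toNat < j
    · rw [if_pos hc, if_pos ⟨hc.1, by omega⟩]
    · rw [if_neg hc]
      by_cases hm : m = j * k.toNat + el.toNat
      · have hd := (decompKE k.toNat el.toNat j m hE).mp hm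
        rw [if_pos hm, if_pos ⟨hd.1, by omega⟩, hd.2]
      · rw [if_neg hm]
        have hnot : ¬(m % k.toNat = el.toNat ∧ m / k.toNat < j + 1) := by
          intro hcon
          have hj' : m / k.toNat = j := by omega
          exact hm ((decompKE k.toNat el.toNat j m hE).mpr ⟨hcon.1, hj'⟩)
        rw [if_neg hnot]

theorem outerA (a : List Int) (n k : Int) (hn : 0 < n) (hk : 0 < k)
    (E : Nat) (hE : E ≤ k.toNat) :
    (((List.range E).map (fun (e : Nat) => (e : Int))).foldl (stepA a n k)
        (List.replicate ((n + 3) * k).toNat (n + 1))).length = ((n + 3) * k).toNat ∧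
    ∀ m : Nat,
      (((List.range E).map (fun (e : Nat) => (e : Int))).foldl (stepA a n k)
        (List.replicate ((n + 3) * k).toNat (n + 1))).getD m 0 =
      if m % k.toNat < E ∧ m / k.toNat < n.toNat then nxtF a n (((m % k.toNat : Nat) : Int) + 1) (m / k.toNat)
      else (List.replicate ((n + 3) * k).toNat (n + 1)).getD m 0 := by
  have hn' : ((n.toNat : Int)) = n := Int.toNat_of_nonneg hn.le
  have hk' : ((k.toNat : Int)) = k := Int.toNat_of_nonneg hk.le
  have hL : ((n + 3) * k).toNat = (n.toNat + 3) * k.toNat := by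
    rw [← hn', ← hk']; norm_cast
  induction E with
  | zero => simp
  | succ E ih =>
    obtain ⟨ihl, ihg⟩ := ih (by omega)
    rw [List.range_succ, List.map_append, List.foldl_append]
    simp only [List.map_cons, List.map_nil, List.foldl_cons, List.foldl_nil]
    obtain ⟨il, ig⟩ := innerA a n k (E : Int) (by positivity) (by omega) n.toNat (le_refl _)
      (((List.range E).map (fun (e : Nat) => (e : Int))).foldl (stepA a n k)
        (List.replicate ((n + 3) * k).toNat (n + 1)))
      (by rw [ihl, hL]; exact Nat.mul_le_mul_right _ (by omega))
    rw [nxtF_top a n ((E : Int) + 1)] at il ig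
    rw [hn'] at il ig
    rw [stepA]
    refine ⟨by rw [il, ihl], ?_⟩
    intro m
    rw [ig m, ihg m]
    by_cases h1 : m % k.toNat = E ∧ m / k.toNat < n.toNat
    · rw [if_pos (show m % k.toNat = ((E : Int)).toNat ∧ m / k.toNat < n.toNat from
          ⟨by omega, h1.2⟩)]
      rw [if_pos (show m % k.toNat < E + 1 ∧ m / k.toNat < n.toNat by omega)]
      rw [h1.1]
    · rw [if_neg (show ¬(m % k.toNat = ((E : Int)).toNat ∧ m / k.toNat < n.toNat) from
          fun hcon => h1 ⟨by omega, hcon.2⟩)]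
      by_cases h2 : m % k.toNat < E ∧ m / k.toNat < n.toNat
      · rw [if_pos h2, if_pos (show m % k.toNat < E + 1 ∧ m / k.toNat < n.toNat by omega)]
      · rw [if_neg h2, if_neg (show ¬(m % k.toNat < E + 1 ∧ m / k.toNat < n.toNat) from
          fun hcon => by
            have hme : m % k.toNat = E := by omega
            exact h1 ⟨hme, hcon.2⟩)]

theorem flatten_rows_length (a : List Int) (n k : Int) (N : Nat) :
    (((List.range N).map (nxtRow a n k)).flatten).length = N * k.toNat := by
  induction N with
  | zero => simp
  | succ N ih =>
    rw [List.range_succ, List.map_append, List.flatten_append, List.length_append, ih]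
    simp only [List.map_cons, List.map_nil, List.flatten_cons, List.flatten_nil,
      List.append_nil, length_nxtRow]
    ring

theorem flatten_rows_getD (a : List Int) (n k : Int) (N : Nat) (m : Nat) (hk : 0 < k) :
    (((List.range N).map (nxtRow a n k)).flatten).getD m 0 =
      if m < N * k.toNat then nxtF a n (((m % k.toNat : Nat) : Int) + 1) (m / k.toNat) else 0 := by
  have hK : 0 < k.toNat := by omega
  induction N with
  | zero => simp
  | succ N ih =>
    rw [List.range_succ, List.map_append, List.flatten_append]
    have hsucc : (N + 1) * k.toNat = N * k.toNat + k.toNat := by ring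
    by_cases hm : m < N * k.toNat
    · rw [List.getD_append _ _ _ _ (by rw [flatten_rows_length]; exact hm), ih]
      rw [if_pos hm, if_pos (by omega)]
    · rw [List.getD_append_right _ _ _ _ (by rw [flatten_rows_length]; omega)]
      rw [flatten_rows_length]
      simp only [List.map_cons, List.map_nil, List.flatten_cons, List.flatten_nil, List.append_nil]
      by_cases hm2 : m < (N + 1) * k.toNat
      · have hr : m - N * k.toNat < k.toNat := by omega
        have hd := (decompKE k.toNat (m - N * k.toNat) N m hr).mp (by omega)
        rw [if_pos hm2, nxtRow_getD, if_pos hr, hd.1, hd.2]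
      · rw [if_neg hm2]
        apply List.getD_eq_default
        rw [length_nxtRow]
        omega

-- ===== VERDICT (by name: the statement is the Claim_ definition above) =====
theorem make_next_positions_spec : Claim_equal_make_next_positions := by
  intro a n k _hdom _hpre
  unfold Spec_make_next_positions make_next_positions make_next_positions_alt
  by_cases hk : k ≤ 0
  · rw [if_pos (Or.inl hk), PySem.List.pyRange_one_eq_nil hk, List.foldl_nil]
  · rw [not_le] at hk
    by_cases hn : n ≤ 0
    · rw [if_pos (Or.inr hn)]
      have hstep : ∀ (p : List Int) (el : Int), stepA a n k p el = p := by
        intro p el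
        unfold stepA
        rw [PySem.List.pyRange_neg_one_eq_nil (by omega : n - 1 ≤ -1)]
        rfl
      exact foldl_fixed _ hstep _ _
    · rw [not_le] at hn
      have hn' : ((n.toNat : Int)) = n := Int.toNat_of_nonneg hn.le
      have hk' : ((k.toNat : Int)) = k := Int.toNat_of_nonneg hk.le
      have hK : 0 < k.toNat := by omega
      have hL : ((n + 3) * k).toNat = (n.toNat + 3) * k.toNat := by rw [← hn', ← hk']; norm_cast
      have h3k : (3 * k).toNat = 3 * k.toNat := by rw [← hk']; norm_cast
      rw [if_neg (by omega)]
      -- B side: rewrite to flattened rows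
      have hB :
          ((PySem.List.pyRange (n - 1) (-1) (-1)).foldl (rowStepB a k)
              (List.replicate k.toNat (n + 1), [])).2.reverse.flatten
          = ((List.range n.toNat).map (nxtRow a n k)).flatten := by
        rw [show n - 1 = ((n.toNat : Int)) - 1 by rw [hn'], ← nxtRow_top a n k]
        rw [altFold a n k n.toNat (le_refl _) []]
        simp only [List.nil_append]
        rw [List.map_reverse, List.reverse_reverse]
      rw [hB]
      -- A side characterization
      have hpr : PySem.List.pyRange 0 k 1 = (List.range k.toNat).map (fun (e : Nat) => (e : Int)) := by
        rw [← hk']; exact PySem.List.pyRange_zero_nat k.toNat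
      rw [hpr]
      obtain ⟨hAl, hAg⟩ := outerA a n k hn hk k.toNat (le_refl _)
      apply ext_getD
      · rw [hAl, List.length_append, flatten_rows_length, List.length_replicate, hL, h3k]
        ring
      · intro m
        rw [hAg m]
        have hmod : m % k.toNat < k.toNat := Nat.mod_lt _ hK
        have hdiv : m / k.toNat < n.toNat ↔ m < n.toNat * k.toNat := Nat.div_lt_iff_lt_mul hK
        have hrep : ∀ (L : Nat) (m' : Nat), (List.replicate L (n + 1 : Int)).getD m' 0 =
            if m' < L then n + 1 else 0 := by
          intro L m'
          by_cases hm' : m' < L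
          · rw [if_pos hm', List.getD_eq_getElem _ _ (by simpa using hm'), List.getElem_replicate]
          · rw [if_neg hm', List.getD_eq_default _ _ (by simpa using hm')]
        have hLsum : ((n + 3) * k).toNat = n.toNat * k.toNat + 3 * k.toNat := by rw [hL]; ring
        by_cases hm : m < n.toNat * k.toNat
        · rw [if_pos ⟨hmod, hdiv.mpr hm⟩]
          rw [List.getD_append _ _ _ _ (by rw [flatten_rows_length]; exact hm)]
          rw [flatten_rows_getD a n k n.toNat m hk, if_pos hm]
        · rw [if_neg (fun hcon => hm (hdiv.mp hcon.2))]
          rw [List.getD_append_right _ _ _ _ (by rw [flatten_rows_length]; omega)]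
          rw [flatten_rows_length, hrep, hrep]
          by_cases hm2 : m < ((n + 3) * k).toNat
          · rw [if_pos hm2, if_pos (by rw [h3k]; omega)]
          · rw [if_neg hm2, if_neg (by rw [h3k]; omega)]
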